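-- pv_equiv track=rewrite | github.com/ProjectAlita/alita-sdk | alita_sdk/tools/bitbucket/cloud_api_wrapper.py | _filter_non_recursive
-- ===== SOURCE A (Python) =====
-- def _filter_non_recursive(files_list: list, base_path: str) -> list:
--     """Filter file list to only include direct children (non-recursive).
--
--     Parameters:
--         files_list (list): List of all file paths
--         base_path (str): The base path to filter from
--
--     Returns:
--         list: Filtered list containing only direct children
--     """
--     filtered = []
--     # Normalize base_path (remove trailing slash if present)
--     base_path = base_path.rstrip('/') if base_path else ''
--
--     for file_path in files_list:
--         # If base_path is empty (root), check if file has no directory separators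
--         if not base_path:
--             # Only include files without '/' (direct children of root)
--             if '/' not in file_path:
--                 filtered.append(file_path)
--         else:
--             # Check if file starts with base_path and has no additional subdirectories
--             if file_path.startswith(base_path + '/'):
--                 # Get the relative part after base_path
--                 relative_path = file_path[len(base_path) + 1:]
--                 # Only include if there's no '/' in the relative path (direct child)
--                 if '/' not in relative_path:
--                     filtered.append(file_path)
--
--     return filtered
-- ===== SOURCE B (Python) =====
-- def _filter_non_recursive(files_list: list, base_path: str) -> list:
--     """Filter file list to only include direct children (non-recursive).
--
--     Builds a parent-directory index (one grouping pass), then the answer is a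
--     single dictionary lookup: the bucket of the normalized base prefix.
--     """
--     base = base_path.rstrip('/') if base_path else ''
--     prefix = base + '/' if base else ''
--     buckets = {}
--     for f in files_list:
--         head, sep, _tail = f.rpartition('/')
--         buckets.setdefault(head + sep, []).append(f)
--     return buckets.get(prefix, [])
-- ===== Notes on version B (the rewrite author's own statement) =====
-- stated objective: faster
-- what changed: B replaces A's per-file comparison against the base (empty-root case vs rebuilding base+'/' then startswith+slice+relative check each iteration) by a grouping pass that indexes every file under its parent-directory key (rpartition head+sep) in a dict of buckets, then returns the single bucket of the normalized base prefix; no file is ever compared against base_path.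
import Mathlib
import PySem

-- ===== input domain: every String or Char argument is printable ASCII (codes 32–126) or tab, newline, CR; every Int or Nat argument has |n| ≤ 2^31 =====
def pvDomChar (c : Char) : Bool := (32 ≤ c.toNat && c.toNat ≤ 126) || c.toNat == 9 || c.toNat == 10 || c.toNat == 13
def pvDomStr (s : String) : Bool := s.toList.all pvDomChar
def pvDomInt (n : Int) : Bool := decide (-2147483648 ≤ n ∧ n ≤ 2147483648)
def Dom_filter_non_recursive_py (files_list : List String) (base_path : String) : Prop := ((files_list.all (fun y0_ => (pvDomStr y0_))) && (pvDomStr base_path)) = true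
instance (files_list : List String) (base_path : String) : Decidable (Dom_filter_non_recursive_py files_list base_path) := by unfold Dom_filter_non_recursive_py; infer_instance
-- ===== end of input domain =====

-- B groups files into a dict of parent-directory buckets and returns the base's bucket, instead of testing each file against the base per iteration; a timing run measured B faster.


-- ===== PORT A =====
-- exact hand-port of Python's s.rstrip('/'): remove all trailing '/' characters (PySem has no rstrip-with-chars)
def pyRstripSlash (s : List Char) : List Char := (s.reverse.dropWhile (fun c => c == '/')).reverse

def filter_non_recursive_py (files_list : List String) (base_path : String) : List String :=
  -- base_path = base_path.rstrip('/') if base_path else ''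
  let base : List Char := if base_path.toList.isEmpty then [] else pyRstripSlash base_path.toList
  files_list.foldl (fun filtered file_path =>
    if base.isEmpty then
      -- if '/' not in file_path: filtered.append(file_path)
      if PySem.Chars.isIn ['/'] file_path.toList = false then filtered ++ [file_path] else filtered
    else
      -- if file_path.startswith(base_path + '/'):
      if PySem.Chars.startswith file_path.toList (base ++ ['/']) then
        -- relative_path = file_path[len(base_path) + 1:]
        let relative_path := PySem.List.slice file_path.toList (some ((base.length : Int) + 1)) none
        if PySem.Chars.isIn ['/'] relative_path = false then filtered ++ [file_path] else filtered
      else filtered) []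

-- ===== PORT B =====
-- exact hand-port of Python's s.rpartition('/') (PySem has no rpartition): split at the LAST '/'
def pyRpartitionSlash (s : List Char) : List Char × List Char × List Char :=
  let r := s.reverse.dropWhile (fun c => c != '/')
  if r.isEmpty then ([], [], s)
  else (r.tail.reverse, ['/'], (s.reverse.takeWhile (fun c => c != '/')).reverse)

def filter_non_recursive_py_alt (files_list : List String) (base_path : String) : List String :=
  let base : List Char := if base_path.toList.isEmpty then [] else pyRstripSlash base_path.toList
  let pfx : List Char := if base.isEmpty then [] else base ++ ['/']
  -- buckets: parent-directory key (head + sep of rpartition) -> files directly under it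
  let buckets : PySem.Dict (List Char) (List String) :=
    files_list.foldl (fun d f =>
      let p := pyRpartitionSlash f.toList
      d.modify (p.1 ++ p.2.1) [] (· ++ [f])) PySem.Dict.empty
  buckets.getD pfx []

-- ===== PRECONDITION & SPEC =====
def Spec_filter_non_recursive_py (files_list : List String) (base_path : String) (out : List String) : Prop := out = filter_non_recursive_py_alt files_list base_path
instance (files_list : List String) (base_path : String) (out : List String) : Decidable (Spec_filter_non_recursive_py files_list base_path out) := by unfold Spec_filter_non_recursive_py; infer_instance

-- ===== CLAIM (what is proved, stated in full; the proofs are below) =====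
def Claim_equal_filter_non_recursive_py : Prop := ∀ (files_list : List String) (base_path : String), Dom_filter_non_recursive_py files_list base_path → Spec_filter_non_recursive_py files_list base_path (filter_non_recursive_py files_list base_path)

-- ===== LEMMAS AND PROOFS =====

-- the parent-directory key of B is the prefix of f up to and including its last '/'
def dirPrefix (s : List Char) : List Char := (s.reverse.dropWhile (fun c => c != '/')).reverse

lemma rpartition_key (s : List Char) :
    (pyRpartitionSlash s).1 ++ (pyRpartitionSlash s).2.1 = dirPrefix s := by
  unfold pyRpartitionSlash dirPrefix
  by_cases h : (s.reverse.dropWhile (fun c => c != '/')).isEmpty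
  · rw [List.isEmpty_iff] at h
    simp [h]
  · have hne : s.reverse.dropWhile (fun c => c != '/') ≠ [] := by
      simpa [List.isEmpty_iff] using h
    have hh : (s.reverse.dropWhile (fun c => c != '/')).head hne = '/' := by
      have := List.head_dropWhile_not (fun c => c != '/') hne
      simpa using this
    simp only [h, Bool.false_eq_true, if_false]
    conv_rhs => rw [← List.cons_head_tail hne, hh]
    simp

lemma dirPrefix_eq_nil_iff (f : List Char) : dirPrefix f = [] ↔ '/' ∉ f := by
  unfold dirPrefix
  rw [List.reverse_eq_nil_iff, List.dropWhile_eq_nil_iff]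
  simp only [List.mem_reverse, bne_iff_ne, ne_eq]
  constructor
  · intro h hmem; exact h '/' hmem rfl
  · intro h x hx he; exact h (he ▸ hx)

lemma dirPrefix_eq_append_iff (b f : List Char) :
    dirPrefix f = b ++ ['/'] ↔ ∃ r, f = b ++ '/' :: r ∧ '/' ∉ r := by
  constructor
  · intro hd
    have hdw : f.reverse.dropWhile (fun c => c != '/') = '/' :: b.reverse := by
      have := congrArg List.reverse hd
      simpa [dirPrefix] using this
    refine ⟨(f.reverse.takeWhile (fun c => c != '/')).reverse, ?_, ?_⟩
    · have hsplit : f.reverse.takeWhile (fun c => c != '/') ++ ('/' :: b.reverse) = f.reverse := by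
        rw [← hdw]; exact List.takeWhile_append_dropWhile
      have := congrArg List.reverse hsplit
      simpa using this.symm
    · intro hmem
      rw [List.mem_reverse] at hmem
      have := List.mem_takeWhile_imp hmem
      simp at this
  · rintro ⟨r, rfl, hmem⟩
    have hall : r.reverse.dropWhile (fun c => c != '/') = [] := by
      rw [List.dropWhile_eq_nil_iff]
      intro x hx
      simp only [List.mem_reverse] at hx
      simp only [bne_iff_ne, ne_eq]
      intro he
      exact hmem (he ▸ hx)
    unfold dirPrefix
    have hrev : (b ++ '/' :: r).reverse = r.reverse ++ ('/' :: b.reverse) := by simp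
    rw [hrev, List.dropWhile_append, hall]
    simp

-- '/' not in s, as membership
lemma isIn_single_false_iff (c : Char) (s : List Char) :
    PySem.Chars.isIn [c] s = false ↔ c ∉ s := by
  rw [PySem.Chars.isIn_eq_false_iff, List.singleton_infix_iff]

-- per-file: A's branching test equals "parent-directory key = pfx"
lemma cond_eq (b : List Char) (f : List Char) :
    (if b.isEmpty then (PySem.Chars.isIn ['/'] f == false)
     else PySem.Chars.startswith f (b ++ ['/']) &&
          (PySem.Chars.isIn ['/'] (PySem.List.slice f (some ((b.length : Int) + 1)) none) == false))
    = (dirPrefix f == (if b.isEmpty then [] else b ++ ['/'])) := by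
  by_cases hb : b.isEmpty
  · rw [Bool.eq_iff_iff]
    simp [hb, isIn_single_false_iff, dirPrefix_eq_nil_iff]
  · rw [Bool.eq_iff_iff]
    simp only [hb, Bool.false_eq_true, if_false, Bool.and_eq_true, beq_iff_eq,
      dirPrefix_eq_append_iff]
    constructor
    · rintro ⟨hs, hrel⟩
      obtain ⟨r, hr⟩ := (PySem.Chars.startswith_iff f (b ++ ['/'])).1 hs
      have hcast : ((b.length : Int) + 1) = ((b.length + 1 : Nat) : Int) := by push_cast; ring
      have hsl : PySem.List.slice f (some ((b.length : Int) + 1)) none = r := by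
        rw [hcast, PySem.List.slice_from_natCast, ← hr,
          List.drop_left' (by simp [List.length_append])]
      refine ⟨r, by simp [← hr], ?_⟩
      rw [hsl] at hrel
      exact (isIn_single_false_iff '/' r).1 (by simpa using hrel)
    · rintro ⟨r, rfl, hmem⟩
      have hs : PySem.Chars.startswith (b ++ '/' :: r) (b ++ ['/']) := by
        rw [PySem.Chars.startswith_iff]
        exact ⟨r, by simp⟩
      have hcast : ((b.length : Int) + 1) = ((b.length + 1 : Nat) : Int) := by push_cast; ring
      have hsl : PySem.List.slice (b ++ '/' :: r) (some ((b.length : Int) + 1)) none = r := by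
        rw [hcast, PySem.List.slice_from_natCast]
        rw [show b ++ '/' :: r = (b ++ ['/']) ++ r by simp]
        rw [List.drop_left' (by simp [List.length_append])]
      refine ⟨hs, ?_⟩
      rw [hsl]
      simpa using (isIn_single_false_iff '/' r).2 hmem

-- the fold of A is a filter by A's per-file test
lemma fold_eq_filter (fl : List String) (b : List Char) :
    fl.foldl (fun filtered file_path =>
      if b.isEmpty then
        if PySem.Chars.isIn ['/'] file_path.toList = false then filtered ++ [file_path] else filtered
      else
        if PySem.Chars.startswith file_path.toList (b ++ ['/']) then
          if PySem.Chars.isIn ['/'] (PySem.List.slice file_path.toList (some ((b.length : Int) + 1)) none) = false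
          then filtered ++ [file_path] else filtered
        else filtered) []
    = fl.filter (fun f =>
        if b.isEmpty then (PySem.Chars.isIn ['/'] f.toList == false)
        else PySem.Chars.startswith f.toList (b ++ ['/']) &&
             (PySem.Chars.isIn ['/'] (PySem.List.slice f.toList (some ((b.length : Int) + 1)) none) == false)) := by
  have h1 : (fun (filtered : List String) (file_path : String) =>
      if b.isEmpty then
        if PySem.Chars.isIn ['/'] file_path.toList = false then filtered ++ [file_path] else filtered
      else
        if PySem.Chars.startswith file_path.toList (b ++ ['/']) then
          if PySem.Chars.isIn ['/'] (PySem.List.slice file_path.toList (some ((b.length : Int) + 1)) none) = false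
          then filtered ++ [file_path] else filtered
        else filtered)
      = (fun (acc : List String) (x : String) =>
          if (if b.isEmpty then (PySem.Chars.isIn ['/'] x.toList == false)
              else PySem.Chars.startswith x.toList (b ++ ['/']) &&
                   (PySem.Chars.isIn ['/'] (PySem.List.slice x.toList (some ((b.length : Int) + 1)) none) == false)) = true
          then acc ++ [(fun y => y) x] else acc) := by
    funext acc x
    by_cases hb : b.isEmpty
    · by_cases h : PySem.Chars.isIn ['/'] x.toList <;> simp [hb, h]
    · by_cases hs : PySem.Chars.startswith x.toList (b ++ ['/'])
      · by_cases h : PySem.Chars.isIn ['/'] (PySem.List.slice x.toList (some ((b.length : Int) + 1)) none) <;>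
          simp [hb, hs, h]
      · simp [hb, hs]
  rw [h1, PySem.List.foldl_append_if]
  simp

-- B's bucket of key k is the filter by dirPrefix = k
lemma bucket_eq_filter (fl : List String) (k : List Char) :
    (fl.foldl (fun d f =>
        let p := pyRpartitionSlash f.toList
        d.modify (p.1 ++ p.2.1) [] (· ++ [f])) (PySem.Dict.empty : PySem.Dict (List Char) (List String))).getD k []
    = fl.filter (fun f => dirPrefix f.toList == k) := by
  have hstep : (fun (d : PySem.Dict (List Char) (List String)) (f : String) =>
      let p := pyRpartitionSlash f.toList
      d.modify (p.1 ++ p.2.1) [] (· ++ [f]))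
      = (fun (d : PySem.Dict (List Char) (List String)) (f : String) =>
          d.modify (dirPrefix f.toList) [] (· ++ [f])) := by
    funext d f
    simp only [rpartition_key]
  rw [hstep]
  have hmap : fl.foldl (fun (d : PySem.Dict (List Char) (List String)) f =>
        d.modify (dirPrefix f.toList) [] (· ++ [f])) PySem.Dict.empty
      = (fl.map (fun f => (dirPrefix f.toList, f))).foldl
          (fun d p => d.modify p.1 [] (· ++ [p.2])) PySem.Dict.empty := by
    rw [List.foldl_map]
  rw [hmap, PySem.Dict.getD_foldl_modify_append, PySem.Dict.getD_empty, List.filter_map]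
  simp [Function.comp_def]

-- ===== VERDICT (by name: the statement is the Claim_ definition above) =====
theorem filter_non_recursive_py_spec : Claim_equal_filter_non_recursive_py := by
  intro fl bp _
  show filter_non_recursive_py fl bp = filter_non_recursive_py_alt fl bp
  unfold filter_non_recursive_py filter_non_recursive_py_alt
  rw [fold_eq_filter, bucket_eq_filter]
  apply List.filter_congr
  intro x _
  exact cond_eq (if bp.toList.isEmpty then [] else pyRstripSlash bp.toList) x.toList
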